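-- pv_equiv track=rewrite | github.com/SanikaVT/serverlessApplicationRestaurantManagement | halifax_foodie/lambda/getTitleAndIngredients.py | getRecipeName
-- ===== SOURCE A (Python) =====
-- def getRecipeName(entities):
--     RecName = 'Recipe Title'
--     for i in range(len(entities['Entities'])):
--         if entities['Entities'][i]['Type'] == 'TITLE':
--             RecName = entities['Entities'][i]['Text']
--         else:
--             continue
--     return RecName
-- ===== SOURCE B (Python) =====
-- def getRecipeName(entities):
--     for entity in reversed(entities['Entities']):
--         if entity['Type'] == 'TITLE':
--             return entity['Text']
--     return 'Recipe Title'
-- ===== Notes on version B (the rewrite author's own statement) =====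
-- stated objective: simpler
-- what changed: Replaces the forward index scan that keeps overwriting an accumulator with an early-exit reverse scan that returns the first TITLE's Text immediately (last match = first match in reverse).
import Mathlib
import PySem

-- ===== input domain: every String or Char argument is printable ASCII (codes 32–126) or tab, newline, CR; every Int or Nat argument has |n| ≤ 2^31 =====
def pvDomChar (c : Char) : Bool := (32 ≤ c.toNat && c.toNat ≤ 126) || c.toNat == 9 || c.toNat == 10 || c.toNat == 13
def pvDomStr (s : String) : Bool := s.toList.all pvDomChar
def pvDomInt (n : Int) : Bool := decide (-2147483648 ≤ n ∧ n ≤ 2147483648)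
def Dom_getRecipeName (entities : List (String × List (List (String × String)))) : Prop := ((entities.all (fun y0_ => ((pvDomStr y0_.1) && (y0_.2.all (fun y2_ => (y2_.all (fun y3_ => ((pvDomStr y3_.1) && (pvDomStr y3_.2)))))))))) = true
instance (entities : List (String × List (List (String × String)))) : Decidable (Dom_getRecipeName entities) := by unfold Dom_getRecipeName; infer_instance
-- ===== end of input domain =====

-- B replaces A's forward overwrite-accumulator scan with an early-exit reverse scan (simpler decomposition, same cost).

-- ===== PORT A =====
-- A: RecName := 'Recipe Title'; forward loop over entities['Entities'], overwriting
-- RecName with entity['Text'] whenever entity['Type'] == 'TITLE'.  Dict access is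
-- first-match assoc-list lookup; the .getD defaults are never reached under Pre_.
def getRecipeName (entities : List (String × List (List (String × String)))) : String :=
  let ents := ((PySem.Dict.mk entities).get? "Entities").getD []
  ents.foldl
    (fun recName e =>
      if ((PySem.Dict.mk e).get? "Type").getD "" == "TITLE" then
        ((PySem.Dict.mk e).get? "Text").getD ""
      else recName)
    "Recipe Title"

-- ===== PORT B =====
-- B: scan the reversed entity list, returning the first TITLE's Text, default if none.
def findTitleRev (l : List (List (String × String))) : String :=
  match l with
  | [] => "Recipe Title"
  | e :: rest =>
    if ((PySem.Dict.mk e).get? "Type").getD "" == "TITLE" then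
      ((PySem.Dict.mk e).get? "Text").getD ""
    else findTitleRev rest

def getRecipeName_alt (entities : List (String × List (List (String × String)))) : String :=
  findTitleRev (((PySem.Dict.mk entities).get? "Entities").getD []).reverse

-- ===== PRECONDITION & SPEC =====
-- Pre_ = exactly the inputs where Python A returns: the 'Entities' key is present,
-- every entity has a 'Type' key, and entities typed 'TITLE' have a 'Text' key.
def Pre_getRecipeName (entities : List (String × List (List (String × String)))) : Prop :=
  ((PySem.Dict.mk entities).get? "Entities").isSome = true ∧
  ∀ e ∈ (((PySem.Dict.mk entities).get? "Entities").getD []),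
    ((PySem.Dict.mk e).get? "Type").isSome = true ∧
    (((PySem.Dict.mk e).get? "Type") = some "TITLE" →
      ((PySem.Dict.mk e).get? "Text").isSome = true)

instance (entities : List (String × List (List (String × String)))) : Decidable (Pre_getRecipeName entities) := by
  unfold Pre_getRecipeName; infer_instance

def pvWitness_getRecipeName : (List (String × List (List (String × String)))) :=
  [("Entities", [[("Type", "TITLE"), ("Text", "Pie")], [("Type", "OTHER")]])]

def Spec_getRecipeName (entities : List (String × List (List (String × String)))) (out : String) : Prop := out = getRecipeName_alt entities
instance (entities : List (String × List (List (String × String)))) (out : String) : Decidable (Spec_getRecipeName entities out) := by unfold Spec_getRecipeName; infer_instance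

-- ===== CLAIM (what is proved, stated in full; the proofs are below) =====
def Claim_equal_getRecipeName : Prop := ∀ (entities : List (String × List (List (String × String)))), Dom_getRecipeName entities → Pre_getRecipeName entities → Spec_getRecipeName entities (getRecipeName entities)

-- ===== LEMMAS AND PROOFS =====

-- first TITLE of a reversed list, as an Option
def findTitle? (l : List (List (String × String))) : Option String :=
  match l with
  | [] => none
  | e :: rest =>
    if ((PySem.Dict.mk e).get? "Type").getD "" == "TITLE" then
      some (((PySem.Dict.mk e).get? "Text").getD "")
    else findTitle? rest

theorem findTitleRev_eq (l : List (List (String × String))) :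
    findTitleRev l = (findTitle? l).getD "Recipe Title" := by
  induction l with
  | nil => rfl
  | cons e rest ih =>
    simp only [findTitleRev, findTitle?]
    split <;> simp [ih]

theorem findTitle?_append (xs ys : List (List (String × String))) :
    findTitle? (xs ++ ys) = (findTitle? xs).or (findTitle? ys) := by
  induction xs with
  | nil => rfl
  | cons e rest ih =>
    simp only [List.cons_append, findTitle?]
    split <;> simp [ih]

theorem foldl_eq_findTitle? (l : List (List (String × String))) (acc : String) :
    l.foldl
      (fun recName e =>
        if ((PySem.Dict.mk e).get? "Type").getD "" == "TITLE" then
          ((PySem.Dict.mk e).get? "Text").getD ""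
        else recName) acc
    = (findTitle? l.reverse).getD acc := by
  induction l generalizing acc with
  | nil => rfl
  | cons e rest ih =>
    simp only [List.foldl_cons, List.reverse_cons, findTitle?_append, ih]
    cases h : findTitle? rest.reverse with
    | some v => simp
    | none => simp only [Option.or, findTitle?]; split <;> simp

-- ===== VERDICT (by name: the statement is the Claim_ definition above) =====
theorem getRecipeName_spec : Claim_equal_getRecipeName := by
  intro entities _ _
  unfold Spec_getRecipeName getRecipeName getRecipeName_alt
  rw [findTitleRev_eq, foldl_eq_findTitle?]
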